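-- pv_equiv track=rewrite | github.com/rush86999/atom | backend/scripts/voice_integration_service.py | _extract_parameters
-- ===== SOURCE A (Python) =====
-- from typing import Any, Dict, List, Optional, Tuple
--
-- def _extract_parameters(
--     transcription: str, parameter_keys: List[str]
-- ) -> Dict[str, Any]:
--     """Extract parameters from transcribed text"""
--     parameters = {}
--     transcription_lower = transcription.lower()
--
--     # Simplified parameter extraction (in production, use NLP)
--     for param in parameter_keys:
--         if param == "title" and "task" in transcription_lower:
--             parameters["title"] = "New Task from Voice"
--         elif param == "time" and any(
--             word in transcription_lower for word in ["am", "pm", "o'clock"]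
--         ):
--             parameters["time"] = "2:00 PM"
--         elif param == "date" and any(
--             word in transcription_lower
--             for word in ["tomorrow", "today", "monday", "tuesday"]
--         ):
--             parameters["date"] = "tomorrow"
--         elif param == "recipient" and "to" in transcription_lower:
--             # Extract recipient name (simplified)
--             parameters["recipient"] = "Team Member"
--         elif param == "message":
--             parameters["message"] = transcription
--         elif param == "query":
--             parameters["query"] = "artificial intelligence"
--         elif param == "priority" and "priority" in transcription_lower:
--             parameters["priority"] = "medium"
--
--     return parameters
-- ===== SOURCE B (Python) =====
-- # Inverted keyword scan: first build the full candidate dict from the text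
-- # (one pass over trigger words), then filter it by the requested keys.
-- _TRIGGERS = [
--     ("task", "title", "New Task from Voice"),
--     ("am", "time", "2:00 PM"),
--     ("pm", "time", "2:00 PM"),
--     ("o'clock", "time", "2:00 PM"),
--     ("tomorrow", "date", "tomorrow"),
--     ("today", "date", "tomorrow"),
--     ("monday", "date", "tomorrow"),
--     ("tuesday", "date", "tomorrow"),
--     ("to", "recipient", "Team Member"),
--     ("priority", "priority", "medium"),
-- ]
--
-- def _extract_parameters(transcription, parameter_keys):
--     """Extract parameters from transcribed text (inverted keyword scan)."""
--     text = transcription.lower()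
--     candidates = {"message": transcription, "query": "artificial intelligence"}
--     for word, param, value in _TRIGGERS:
--         if word in text:
--             candidates[param] = value
--     return {k: candidates[k] for k in parameter_keys if k in candidates}
-- ===== Notes on version B (the rewrite author's own statement) =====
-- stated objective: alternative
-- what changed: Inverts the scan: instead of branching per requested parameter, B first builds the complete candidate dict in one pass over a flat trigger-word list (word -> param -> value) plus the two unconditional entries, then produces the result by filtering that dict through parameter_keys with a dict comprehension.
import Mathlib
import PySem

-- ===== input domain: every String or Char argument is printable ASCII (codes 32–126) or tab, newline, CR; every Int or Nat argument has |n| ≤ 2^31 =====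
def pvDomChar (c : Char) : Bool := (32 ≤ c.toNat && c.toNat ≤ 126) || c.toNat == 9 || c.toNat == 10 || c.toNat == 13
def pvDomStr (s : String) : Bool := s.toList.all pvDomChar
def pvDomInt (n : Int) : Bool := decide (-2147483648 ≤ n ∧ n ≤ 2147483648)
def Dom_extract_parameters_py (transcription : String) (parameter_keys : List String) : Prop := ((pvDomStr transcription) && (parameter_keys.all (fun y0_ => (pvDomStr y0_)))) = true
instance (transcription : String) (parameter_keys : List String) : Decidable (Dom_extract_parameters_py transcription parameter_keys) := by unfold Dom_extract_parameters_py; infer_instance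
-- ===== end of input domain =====

-- B inverts the scan: it builds the full candidate dict from the text in one pass over a flat
-- trigger-word list, then filters it through the requested keys; equivalence proved on all inputs.

-- ===== PORT A =====
-- one iteration of A's elif chain (transcription kept for the "message" branch; tl = transcription.lower())
def pvStepA (transcription tl : String) (params : PySem.Dict String String) (param : String) : PySem.Dict String String :=
  if param == "title" && PySem.Str.isIn "task" tl then
    params.insert "title" "New Task from Voice"
  else if param == "time" && (["am", "pm", "o'clock"].any (fun w => PySem.Str.isIn w tl)) then
    params.insert "time" "2:00 PM"
  else if param == "date" && (["tomorrow", "today", "monday", "tuesday"].any (fun w => PySem.Str.isIn w tl)) then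
    params.insert "date" "tomorrow"
  else if param == "recipient" && PySem.Str.isIn "to" tl then
    params.insert "recipient" "Team Member"
  else if param == "message" then
    params.insert "message" transcription
  else if param == "query" then
    params.insert "query" "artificial intelligence"
  else if param == "priority" && PySem.Str.isIn "priority" tl then
    params.insert "priority" "medium"
  else params

def extract_parameters_py (transcription : String) (parameter_keys : List String) : List (String × String) :=
  (parameter_keys.foldl (pvStepA transcription (PySem.Str.lower transcription)) PySem.Dict.empty).items

-- ===== PORT B =====
-- B's flat trigger table: (trigger word, parameter name, value)
def pvTriggers : List (String × String × String) :=
  [("task", "title", "New Task from Voice"),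
   ("am", "time", "2:00 PM"),
   ("pm", "time", "2:00 PM"),
   ("o'clock", "time", "2:00 PM"),
   ("tomorrow", "date", "tomorrow"),
   ("today", "date", "tomorrow"),
   ("monday", "date", "tomorrow"),
   ("tuesday", "date", "tomorrow"),
   ("to", "recipient", "Team Member"),
   ("priority", "priority", "medium")]

-- stage 1: the full candidate dict built from the text (text = transcription.lower())
def pvCandidates (transcription text : String) : PySem.Dict String String :=
  pvTriggers.foldl
    (fun d t => if PySem.Str.isIn t.1 text then d.insert t.2.1 t.2.2 else d)
    (PySem.Dict.ofList [("message", transcription), ("query", "artificial intelligence")])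

-- stage 2: the dict comprehension {k: candidates[k] for k in parameter_keys if k in candidates}
def extract_parameters_py_alt (transcription : String) (parameter_keys : List String) : List (String × String) :=
  (let candidates := pvCandidates transcription (PySem.Str.lower transcription)
   parameter_keys.foldl
     (fun d k => match candidates.get? k with
                 | some v => d.insert k v
                 | none => d)
     PySem.Dict.empty).items

-- ===== PRECONDITION & SPEC =====
def Spec_extract_parameters_py (transcription : String) (parameter_keys : List String) (out : List (String × String)) : Prop := out = extract_parameters_py_alt transcription parameter_keys
instance (transcription : String) (parameter_keys : List String) (out : List (String × String)) : Decidable (Spec_extract_parameters_py transcription parameter_keys out) := by unfold Spec_extract_parameters_py; infer_instance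

-- ===== CLAIM =====
def Claim_equal_extract_parameters_py : Prop := ∀ (transcription : String) (parameter_keys : List String), Dom_extract_parameters_py transcription parameter_keys → Spec_extract_parameters_py transcription parameter_keys (extract_parameters_py transcription parameter_keys)

-- ===== LEMMAS AND PROOFS =====
-- get? passes over a conditional insert of a different key …
theorem pvGetIteNe (c : Bool) (d : PySem.Dict String String) (k v p : String) (h : p ≠ k) :
    (if c then d.insert k v else d).get? p = d.get? p := by
  cases c <;> simp [PySem.Dict.get?_insert_of_ne _ _ h]

-- … and resolves a conditional insert of the same key
theorem pvGetIteSelf (c : Bool) (d : PySem.Dict String String) (k v : String) :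
    (if c then d.insert k v else d).get? k = if c then some v else d.get? k := by
  cases c <;> simp

-- the candidate-dict lookup agrees pointwise with A's branch conditions
theorem pvCandidates_get? (transcription text : String) (param : String) :
    (pvCandidates transcription text).get? param =
      if param = "title" then (if PySem.Str.isIn "task" text then some "New Task from Voice" else none)
      else if param = "time" then (if ["am", "pm", "o'clock"].any (fun w => PySem.Str.isIn w text) then some "2:00 PM" else none)
      else if param = "date" then (if ["tomorrow", "today", "monday", "tuesday"].any (fun w => PySem.Str.isIn w text) then some "tomorrow" else none)
      else if param = "recipient" then (if PySem.Str.isIn "to" text then some "Team Member" else none)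
      else if param = "message" then some transcription
      else if param = "query" then some "artificial intelligence"
      else if param = "priority" then (if PySem.Str.isIn "priority" text then some "medium" else none)
      else none := by
  simp only [pvCandidates, pvTriggers, List.foldl]
  by_cases h1 : param = "title"
  · subst h1
    simp [pvGetIteNe, pvGetIteSelf, PySem.Dict.ofList, PySem.Dict.update, PySem.Dict.get?_insert]
  by_cases h2 : param = "time"
  · subst h2
    simp [pvGetIteNe, pvGetIteSelf, PySem.Dict.ofList, PySem.Dict.update, PySem.Dict.get?_insert]
    split_ifs <;> simp_all
  by_cases h3 : param = "date"
  · subst h3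
    simp [pvGetIteNe, pvGetIteSelf, PySem.Dict.ofList, PySem.Dict.update, PySem.Dict.get?_insert]
    split_ifs <;> simp_all
  by_cases h4 : param = "recipient"
  · subst h4
    simp [pvGetIteNe, pvGetIteSelf, PySem.Dict.ofList, PySem.Dict.update, PySem.Dict.get?_insert]
  by_cases h5 : param = "message"
  · subst h5
    simp [pvGetIteNe, pvGetIteSelf, PySem.Dict.ofList, PySem.Dict.update, PySem.Dict.get?_insert]
  by_cases h6 : param = "query"
  · subst h6
    simp [pvGetIteNe, pvGetIteSelf, PySem.Dict.ofList, PySem.Dict.update, PySem.Dict.get?_insert]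
  by_cases h7 : param = "priority"
  · subst h7
    simp [pvGetIteNe, pvGetIteSelf, PySem.Dict.ofList, PySem.Dict.update, PySem.Dict.get?_insert]
  · rw [pvGetIteNe _ _ _ _ _ h7, pvGetIteNe _ _ _ _ _ h4, pvGetIteNe _ _ _ _ _ h3,
      pvGetIteNe _ _ _ _ _ h3, pvGetIteNe _ _ _ _ _ h3, pvGetIteNe _ _ _ _ _ h3,
      pvGetIteNe _ _ _ _ _ h2, pvGetIteNe _ _ _ _ _ h2, pvGetIteNe _ _ _ _ _ h2,
      pvGetIteNe _ _ _ _ _ h1]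
    simp [PySem.Dict.ofList, PySem.Dict.update, PySem.Dict.get?_insert, h1, h2, h3, h4, h5, h6, h7]

-- each iteration of A's elif chain is one iteration of B's comprehension loop
theorem pvStep_eq (transcription text : String) (d : PySem.Dict String String) (param : String) :
    pvStepA transcription text d param =
      (match (pvCandidates transcription text).get? param with
       | some v => d.insert param v
       | none => d) := by
  rw [pvCandidates_get?]
  unfold pvStepA
  by_cases h1 : param = "title" <;> by_cases h2 : param = "time" <;> by_cases h3 : param = "date" <;>
    by_cases h4 : param = "recipient" <;> by_cases h5 : param = "message" <;>
    by_cases h6 : param = "query" <;> by_cases h7 : param = "priority" <;>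
    simp_all <;> split_ifs <;> simp_all

-- ===== VERDICT =====
theorem extract_parameters_py_spec : Claim_equal_extract_parameters_py := by
  intro transcription parameter_keys _
  unfold Spec_extract_parameters_py extract_parameters_py extract_parameters_py_alt
  rw [funext fun d => funext fun p => pvStep_eq transcription (PySem.Str.lower transcription) d p]
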